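-- pv_equiv track=rewrite | github.com/shihabmuhtasim/CSE-Theory-Nest | COMPUTER SCIENCE/DATA STRUCTURES (CSE220)/Last sem/namirul/LabAssignment.py | repetitionCount
-- ===== SOURCE A (Python) =====
-- def repetitionCount(arr):
--     max_num = -999999999999999999
--     out = False
--     i = 0
--     while(i < len(arr)):
--         if(arr[i] > max_num):
--             max_num = arr[i]
--         i = i + 1
--
--     arr2 = [0]*(max_num+1)
--
--     j = 0
--     while(j < len(arr)):
--         arr2[arr[j]] += 1
--         j = j + 1
--
--     k = 0
--     while(k < len(arr2) - 1):
--         l = k + 1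
--         while(l < len(arr2)):
--             if( (arr2[l] == arr2[k]) and (arr2[l] > 1) ):
--                 out = True
--             l = l + 1
--         k = k + 1
--
--     return out
-- ===== SOURCE B (Python) =====
-- def repetitionCount(arr):
--     # Same count-array build as A (same sentinel / empty / negative-index behaviour),
--     # but detection by sorting the counts once and scanning adjacent pairs (O(M log M)
--     # instead of A's O(M^2) all-pairs scan).
--     max_num = -999999999999999999
--     for x in arr:
--         if x > max_num:
--             max_num = x
--     arr2 = [0] * (max_num + 1)
--     for x in arr:
--         arr2[x] += 1
--     s = sorted(arr2)
--     return any(a == b and a > 1 for a, b in zip(s, s[1:]))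
-- ===== Notes on version B (the rewrite author's own statement) =====
-- stated objective: faster
-- what changed: The count-array build is kept, but A's O(M^2) nested all-pairs scan over the counts is replaced by sorting the counts once and scanning adjacent pairs for an equal pair greater than 1.
import Mathlib
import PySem

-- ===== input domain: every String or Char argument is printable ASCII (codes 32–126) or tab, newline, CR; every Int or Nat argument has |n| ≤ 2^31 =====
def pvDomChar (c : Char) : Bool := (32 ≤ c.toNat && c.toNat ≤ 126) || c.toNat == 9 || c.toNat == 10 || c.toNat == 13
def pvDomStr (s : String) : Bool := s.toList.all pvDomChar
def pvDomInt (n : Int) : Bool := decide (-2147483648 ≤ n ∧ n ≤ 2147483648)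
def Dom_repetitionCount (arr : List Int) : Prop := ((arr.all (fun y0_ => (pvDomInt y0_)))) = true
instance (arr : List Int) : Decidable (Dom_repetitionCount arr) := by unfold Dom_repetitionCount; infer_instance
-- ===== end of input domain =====

-- B changes only the detection pass: the counts are sorted once and scanned for an
-- equal adjacent pair > 1, replacing A's all-pairs nested scan (objective: faster).

-- ===== PORT A =====
-- A's third phase: nested double loop comparing every pair of counts.
def detectPairsA (xs : List Int) : Bool :=
  (PySem.List.pyRange 0 (PySem.List.len xs - 1) 1).foldl (fun out k =>
    (PySem.List.pyRange (k + 1) (PySem.List.len xs) 1).foldl (fun out l =>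
      if (PySem.List.pyGetD xs l 0 == PySem.List.pyGetD xs k 0)
          && decide (1 < PySem.List.pyGetD xs l 0) then true else out) out) false

def repetitionCount (arr : List Int) : Bool :=
  let max_num : Int :=
    (PySem.List.pyRange 0 (PySem.List.len arr) 1).foldl
      (fun m i => if PySem.List.pyGetD arr i 0 > m then PySem.List.pyGetD arr i 0 else m)
      (-999999999999999999)
  let arr2 : List Int :=
    (PySem.List.pyRange 0 (PySem.List.len arr) 1).foldl
      (fun a2 j => PySem.List.pySetD a2 (PySem.List.pyGetD arr j 0)
        (PySem.List.pyGetD a2 (PySem.List.pyGetD arr j 0) 0 + 1))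
      (List.replicate (max_num + 1).toNat (0 : Int))
  detectPairsA arr2

-- ===== PORT B =====
-- B's detection: sort the counts, scan adjacent pairs (s[1:] ported as s.drop 1, exact for start 1 ≥ 0).
def detectSortedB (xs : List Int) : Bool :=
  let s := PySem.List.sorted xs (fun x => x) false
  (s.zip (s.drop 1)).any (fun q => (q.1 == q.2) && decide (1 < q.1))

def repetitionCount_alt (arr : List Int) : Bool :=
  let max_num : Int := arr.foldl (fun m x => if x > m then x else m) (-999999999999999999)
  let arr2 : List Int :=
    arr.foldl (fun a2 x => PySem.List.pySetD a2 x (PySem.List.pyGetD a2 x 0 + 1))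
      (List.replicate (max_num + 1).toNat (0 : Int))
  detectSortedB arr2

-- ===== PRECONDITION & SPEC =====
-- Pre_ excludes exactly the inputs where Python A raises IndexError in the counting
-- loop: a nonempty arr whose maximum is negative (arr2 is empty) or containing an
-- element below -(max+1) (negative index out of range).
def Pre_repetitionCount (arr : List Int) : Prop :=
  ∀ n ∈ arr, ∃ m ∈ arr, 0 ≤ m ∧ -(m + 1) ≤ n
instance (arr : List Int) : Decidable (Pre_repetitionCount arr) := by
  unfold Pre_repetitionCount; infer_instance
def pvWitness_repetitionCount : List Int := [1, 2, 2, 3, 3]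

def Spec_repetitionCount (arr : List Int) (out : Bool) : Prop := out = repetitionCount_alt arr
instance (arr : List Int) (out : Bool) : Decidable (Spec_repetitionCount arr out) := by
  unfold Spec_repetitionCount; infer_instance

-- ===== CLAIM (what is proved, stated in full; the proofs are below) =====
def Claim_equal_repetitionCount : Prop :=
  ∀ (arr : List Int), Dom_repetitionCount arr → Pre_repetitionCount arr →
    Spec_repetitionCount arr (repetitionCount arr)

-- ===== LEMMAS AND PROOFS =====

-- a fold that latches 'out = True' when a condition fires is 'init || any'
theorem foldl_latch_eq_any {α : Type} (p : α → Bool) (l : List α) (b : Bool) :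
    l.foldl (fun out x => if p x then true else out) b = (b || l.any p) := by
  induction l generalizing b with
  | nil => simp
  | cons x xs ih =>
    rw [List.foldl_cons, ih, List.any_cons]
    by_cases h : p x <;> simp [h]

theorem foldl_or_eq_any {α : Type} (p : α → Bool) (l : List α) (b : Bool) :
    l.foldl (fun out x => out || p x) b = (b || l.any p) := by
  induction l generalizing b with
  | nil => simp
  | cons x xs ih => simp [List.foldl_cons, ih, Bool.or_assoc]

-- both detectors decide the same property: some count value > 1 occurs twice
theorem detectPairsA_iff (xs : List Int) :
    detectPairsA xs = true ↔ ∃ v : Int, 1 < v ∧ xs.Duplicate v := by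
  unfold detectPairsA
  simp only [foldl_latch_eq_any]
  simp only [foldl_or_eq_any]
  simp only [Bool.false_or, List.any_eq_true, PySem.List.mem_pyRange_one,
    PySem.List.len_eq, Bool.and_eq_true, beq_iff_eq, decide_eq_true_eq]
  constructor
  · rintro ⟨k, ⟨hk0, hk1⟩, l, ⟨hl0, hl1⟩, heq, hgt⟩
    rw [PySem.List.pyGetD_eq_getElem xs (i := l) 0 (by omega) (by omega),
        PySem.List.pyGetD_eq_getElem xs (i := k) 0 (by omega) (by omega)] at heq
    rw [PySem.List.pyGetD_eq_getElem xs (i := l) 0 (by omega) (by omega)] at hgt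
    refine ⟨xs[l.toNat]'(by omega), hgt, ?_⟩
    rw [List.duplicate_iff_exists_distinct_get]
    exact ⟨⟨k.toNat, by omega⟩, ⟨l.toNat, by omega⟩, by simpa using (by omega : k.toNat < l.toNat),
      by simpa using heq, by simp⟩
  · rintro ⟨v, hv, hdup⟩
    rw [List.duplicate_iff_exists_distinct_get] at hdup
    obtain ⟨n, m, hnm, hxn, hxm⟩ := hdup
    have hn := n.isLt; have hm := m.isLt
    have hnm' : (n : Nat) < (m : Nat) := hnm
    refine ⟨(n : Nat), ⟨by omega, by omega⟩, (m : Nat), ⟨by omega, by omega⟩, ?_, ?_⟩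
    · rw [PySem.List.pyGetD_eq_getElem xs (i := ((m : Nat) : Int)) 0 (by omega) (by omega),
          PySem.List.pyGetD_eq_getElem xs (i := ((n : Nat) : Int)) 0 (by omega) (by omega)]
      simp only [Int.toNat_natCast]
      rw [show xs[(m:Nat)]'(by omega) = v from by simpa [List.get_eq_getElem] using hxm.symm,
          show xs[(n:Nat)]'(by omega) = v from by simpa [List.get_eq_getElem] using hxn.symm]
    · rw [PySem.List.pyGetD_eq_getElem xs (i := ((m : Nat) : Int)) 0 (by omega) (by omega)]
      simp only [Int.toNat_natCast]
      rw [show xs[(m:Nat)]'(by omega) = v from by simpa [List.get_eq_getElem] using hxm.symm]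
      exact hv

theorem dup_iff_of_perm {l1 l2 : List Int} (h : l1.Perm l2) (v : Int) :
    l1.Duplicate v ↔ l2.Duplicate v := by
  rw [List.duplicate_iff_two_le_count, List.duplicate_iff_two_le_count, h.count_eq]

theorem detectSortedB_iff (xs : List Int) :
    detectSortedB xs = true ↔ ∃ v : Int, 1 < v ∧ xs.Duplicate v := by
  unfold detectSortedB
  have hperm := PySem.List.sorted_perm xs (fun x => x) false
  simp only [List.any_eq_true, Bool.and_eq_true, beq_iff_eq, decide_eq_true_eq]
  constructor
  · rintro ⟨q, hq, heq, hgt⟩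
    obtain ⟨i, hi, hqi⟩ := List.mem_iff_getElem.mp hq
    subst hqi
    rw [List.length_zip, List.length_drop] at hi
    have hi1 : i + 1 < (PySem.List.sorted xs (fun x => x) false).length := by omega
    rw [List.getElem_zip, List.getElem_drop] at heq hgt
    have hi1' : 1 + i < (PySem.List.sorted xs (fun x => x) false).length := by omega
    refine ⟨(PySem.List.sorted xs (fun x => x) false)[i]'(by omega), hgt, ?_⟩
    rw [← dup_iff_of_perm hperm, List.duplicate_iff_exists_distinct_get]
    exact ⟨⟨i, by omega⟩, ⟨1 + i, hi1'⟩, by simp,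
      by simp [List.get_eq_getElem], by simpa [List.get_eq_getElem] using heq⟩
  · rintro ⟨v, hv, hdup⟩
    rw [← dup_iff_of_perm hperm, List.duplicate_iff_exists_distinct_get] at hdup
    obtain ⟨n, m, hnm, hxn, hxm⟩ := hdup
    have hn := n.isLt; have hm := m.isLt
    have hnm' : (n : Nat) < (m : Nat) := hnm
    have h1 : 1 + (n : Nat) < (PySem.List.sorted xs (fun x => x) false).length := by omega
    have hmono1 := PySem.List.sorted_id_getElem_mono xs (p := (n : Nat)) (q := 1 + (n : Nat))
      (by omega) (by omega)
    have hmono2 := PySem.List.sorted_id_getElem_mono xs (p := 1 + (n : Nat)) (q := (m : Nat))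
      (by omega) (by omega)
    have hvn : (PySem.List.sorted xs (fun x => x) false)[(n : Nat)]'(by omega) = v := by
      simpa [List.get_eq_getElem] using hxn.symm
    have hvm : (PySem.List.sorted xs (fun x => x) false)[(m : Nat)]'(by omega) = v := by
      simpa [List.get_eq_getElem] using hxm.symm
    have hadj : (PySem.List.sorted xs (fun x => x) false)[(n : Nat)]'(by omega)
        = (PySem.List.sorted xs (fun x => x) false)[1 + (n : Nat)]'h1 := by
      omega
    refine ⟨((PySem.List.sorted xs (fun x => x) false)[(n : Nat)]'(by omega),
             (PySem.List.sorted xs (fun x => x) false)[1 + (n : Nat)]'h1), ?_, hadj, by omega⟩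
    have hzi : ((PySem.List.sorted xs (fun x => x) false).zip
        ((PySem.List.sorted xs (fun x => x) false).drop 1))[(n : Nat)]'(by
          rw [List.length_zip, List.length_drop]; omega)
        = ((PySem.List.sorted xs (fun x => x) false)[(n : Nat)]'(by omega),
           (PySem.List.sorted xs (fun x => x) false)[1 + (n : Nat)]'h1) := by
      rw [List.getElem_zip, List.getElem_drop]
    rw [← hzi]; exact List.getElem_mem _

theorem detect_eq (xs : List Int) : detectPairsA xs = detectSortedB xs := by
  by_cases h : ∃ v : Int, 1 < v ∧ xs.Duplicate v
  · rw [(detectPairsA_iff xs).mpr h, ((detectSortedB_iff xs).mpr h)]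
  · have ha := (detectPairsA_iff xs); have hb := (detectSortedB_iff xs)
    rw [← hb] at ha
    cases hA : detectPairsA xs <;> cases hB : detectSortedB xs <;> simp_all

-- ===== VERDICT (by name: the statement is the Claim_ definition above) =====
theorem repetitionCount_spec : Claim_equal_repetitionCount := by
  intro arr _ _
  unfold Spec_repetitionCount repetitionCount repetitionCount_alt
  simp only [PySem.List.len_eq]
  rw [PySem.List.foldl_pyRange_zero_pyGetD' arr 0 (fun m x => if x > m then x else m)
        (-999999999999999999),
      PySem.List.foldl_pyRange_zero_pyGetD' arr 0
        (fun a2 x => PySem.List.pySetD a2 x (PySem.List.pyGetD a2 x 0 + 1)) _]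
  exact detect_eq _
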